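-- pv_equiv track=rewrite | github.com/MrBrantCode/unitest_baseline | mut_generate/mist_train_taco/taco_10888/solution.py | minimum_colors_to_sort_string
-- ===== SOURCE A (Python) =====
-- def minimum_colors_to_sort_string(n: int, s: str) -> (int, list):
--     """
--     Calculate the minimum number of colors required to color the string `s` such that
--     it can be sorted by swapping any two neighboring characters of different colors.
--
--     Parameters:
--     - n (int): The length of the string.
--     - s (str): The string to be processed.
--
--     Returns:
--     - res (int): The minimum number of colors required.
--     - coloring (list): The array representing the coloring of the string.
--     """
--     c = 1
--     k = [0 for _ in range(26)]
--     code = ord('a')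
--     k[0] = 1
--     ans = []
--
--     for i in range(n):
--         letter = ord(s[i]) - code
--         if k[letter] != 0:
--             ans.append(k[letter])
--         else:
--             for j in range(letter, -1, -1):
--                 if k[j] != 0:
--                     ans.append(k[j])
--                     k[letter] = k[j]
--                     k[j] = 0
--                     break
--                 if j == 0:
--                     c += 1
--                     k[letter] = c
--                     ans.append(c)
--
--     return c, ans
-- ===== SOURCE B (Python) =====
-- def _place(stack, letter, c):
--     # stack: (level, color) pairs with strictly decreasing levels (occupied pile tails).
--     # Find the first entry whose level <= letter (= the greatest occupied level <= letter),
--     # move it up to `letter` reusing its color; if none exists, open a fresh color.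
--     if not stack:
--         return [(letter, c + 1)], c + 1, c + 1
--     lvl, col = stack[0]
--     if lvl <= letter:
--         return [(letter, col)] + stack[1:], col, c
--     rest, used, c2 = _place(stack[1:], letter, c)
--     return [(lvl, col)] + rest, used, c2
--
--
-- def minimum_colors_to_sort_string(n: int, s: str) -> (int, list):
--     stack = [(0, 1)]
--     c = 1
--     ans = []
--     for i in range(n):
--         stack, col, c = _place(stack, ord(s[i]) - 97, c)
--         ans.append(col)
--     return c, ans
-- ===== Notes on version B (the rewrite author's own statement) =====
-- stated objective: alternative
-- what changed: B replaces A's fixed 26-slot color array with its downward index scan and separate exact-match branch by a stack of occupied (tail-level, color) pairs kept strictly decreasing, searched and updated by one recursive predecessor descent.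
-- outside the precondition, e.g. on minimum_colors_to_sort_string(1, 'Z'): A returns (1, []), B returns (2, [2])
import Mathlib
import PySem

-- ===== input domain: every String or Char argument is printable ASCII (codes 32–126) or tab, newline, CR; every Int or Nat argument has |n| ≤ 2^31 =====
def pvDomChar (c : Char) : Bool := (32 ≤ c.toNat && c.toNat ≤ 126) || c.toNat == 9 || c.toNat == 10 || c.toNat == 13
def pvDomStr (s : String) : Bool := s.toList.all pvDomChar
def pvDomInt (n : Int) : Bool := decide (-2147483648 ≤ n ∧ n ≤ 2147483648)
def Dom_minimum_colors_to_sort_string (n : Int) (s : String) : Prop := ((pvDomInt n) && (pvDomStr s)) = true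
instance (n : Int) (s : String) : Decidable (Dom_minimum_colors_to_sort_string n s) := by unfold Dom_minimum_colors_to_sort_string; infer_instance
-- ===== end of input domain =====

-- B replaces A's fixed 26-slot array with downward index scans by a stack of occupied
-- (tail-level, color) pairs searched by one recursive descent (objective: alternative/simpler).

-- ===== PORT A =====
-- A's inner loop 'for j in range(letter, -1, -1)': returns (k, c, appended color).
-- k[letter] writes use letter.toNat: exact for 0 ≤ letter, guaranteed by Pre_.
def mcInner (k : List Int) (letter : Int) (c : Int) : Nat → List Int × Int × Int
  | 0 =>
    if k.getD 0 0 ≠ 0 then ((k.set letter.toNat (k.getD 0 0)).set 0 0, c, k.getD 0 0)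
    else (k.set letter.toNat (c + 1), c + 1, c + 1)
  | j + 1 =>
    if k.getD (j + 1) 0 ≠ 0 then
      ((k.set letter.toNat (k.getD (j + 1) 0)).set (j + 1) 0, c, k.getD (j + 1) 0)
    else mcInner k letter c j

-- body of A's main loop for one letter: returns (k, c, appended color)
def stepA (k : List Int) (c letter : Int) : List Int × Int × Int :=
  if k.getD letter.toNat 0 ≠ 0 then (k, c, k.getD letter.toNat 0)
  else mcInner k letter c letter.toNat

def minimum_colors_to_sort_string (n : Int) (s : String) : Int × List Int :=
  -- c = 1; k = [0]*26; k[0] = 1; ans = []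
  -- for i in range(n): letter = ord(s[i]) - 97 … ; s[i] raises outside Pre_ (default never read inside Pre_)
  ((PySem.List.pyRange 0 n 1).foldl
    (fun (st : List Int × Int × List Int) (i : Int) =>
      let r := stepA st.1 st.2.1 (((PySem.List.pyGetD s.toList i 'a').toNat : Int) - 97)
      (r.1, r.2.1, st.2.2 ++ [r.2.2]))
    ((List.replicate 26 (0 : Int)).set 0 1, 1, ([] : List Int))).2

-- ===== PORT B =====
-- _place: descend the stack of (level, color) pairs (levels strictly decreasing);
-- returns (new stack, color used, new color counter)
def place : List (Int × Int) → Int → Int → List (Int × Int) × Int × Int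
  | [], letter, c => ([(letter, c + 1)], c + 1, c + 1)
  | (lvl, col) :: rest, letter, c =>
    if lvl ≤ letter then ((letter, col) :: rest, col, c)
    else
      let r := place rest letter c
      ((lvl, col) :: r.1, r.2.1, r.2.2)

def minimum_colors_to_sort_string_alt (n : Int) (s : String) : Int × List Int :=
  -- for ch in s[:n]: stack, col, c = _place(stack, ord(ch) - 97, c); ans.append(col)
  -- for i in range(n): … ord(s[i]) …; s[i] raises outside Pre_ (default never read inside Pre_)
  ((PySem.List.pyRange 0 n 1).foldl
    (fun (st : List (Int × Int) × Int × List Int) (i : Int) =>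
      let r := place st.1 (((PySem.List.pyGetD s.toList i 'a').toNat : Int) - 97) st.2.1
      (r.1, r.2.2, st.2.2 ++ [r.2.1]))
    ([(0, 1)], 1, ([] : List Int))).2

-- ===== PRECONDITION & SPEC =====
-- Pre_ = the natural domain: n ≤ len(s) and the first n characters lowercase 'a'..'z'
-- (vacuous for n ≤ 0: the loop runs zero times).  Outside it A raises (s[i] out of range for
-- n > len(s); a character above 'z' or below 'A' indexes past k), except on one quirky corner
-- A still returns on, excluded as outside the task's natural domain: characters 'G'..'`'
-- (negative-index wraparound into k, with the inner loop silently skipped).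
def Pre_minimum_colors_to_sort_string (n : Int) (s : String) : Prop :=
  n ≤ PySem.Str.len s ∧
  ((s.toList.take n.toNat).all fun ch => decide (97 ≤ ch.toNat) && decide (ch.toNat ≤ 122)) = true  -- 'a' ≤ ch ≤ 'z'
instance (n : Int) (s : String) : Decidable (Pre_minimum_colors_to_sort_string n s) := by
  unfold Pre_minimum_colors_to_sort_string; infer_instance

def pvWitness_minimum_colors_to_sort_string : Int × String := (2, "ba")

def Spec_minimum_colors_to_sort_string (n : Int) (s : String) (out : Int × List Int) : Prop := out = minimum_colors_to_sort_string_alt n s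
instance (n : Int) (s : String) (out : Int × List Int) : Decidable (Spec_minimum_colors_to_sort_string n s out) := by unfold Spec_minimum_colors_to_sort_string; infer_instance

-- ===== CLAIM (what is proved, stated in full; the proofs are below) =====
def Claim_equal_minimum_colors_to_sort_string : Prop := ∀ (n : Int) (s : String), Dom_minimum_colors_to_sort_string n s → Pre_minimum_colors_to_sort_string n s → Spec_minimum_colors_to_sort_string n s (minimum_colors_to_sort_string n s)

-- ===== LEMMAS AND PROOFS =====

-- the array k encoded by a stack: color at level j, 0 if unoccupied
def kOf (stack : List (Int × Int)) (j : Int) : Int :=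
  ((stack.find? (fun p => p.1 == j)).map Prod.snd).getD 0

-- simulation invariant between A's 26-slot array and B's stack
def InvKS (k : List Int) (stack : List (Int × Int)) : Prop :=
  k.length = 26 ∧
  (stack.map Prod.fst).Pairwise (· > ·) ∧
  (∀ p ∈ stack, 0 ≤ p.1 ∧ p.1 < 26 ∧ 0 < p.2) ∧
  (∀ j : Nat, j < 26 → k.getD j 0 = kOf stack (j : Int))

lemma kOf_nil (j : Int) : kOf [] j = 0 := rfl

lemma kOf_cons (l co : Int) (t : List (Int × Int)) (j : Int) :
    kOf ((l, co) :: t) j = if l = j then co else kOf t j := by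
  by_cases h : l = j
  · simp [kOf, List.find?_cons_of_pos, h]
  · simp [kOf, h]

lemma kOf_append_of_forall_ne (pre suf : List (Int × Int)) (j : Int)
    (h : ∀ p ∈ pre, p.1 ≠ j) : kOf (pre ++ suf) j = kOf suf j := by
  induction pre with
  | nil => rfl
  | cons p t ih =>
      obtain ⟨l, co⟩ := p
      rw [List.cons_append, kOf_cons, if_neg (h (l, co) (by simp))]
      exact ih (fun q hq => h q (by simp [hq]))

lemma kOf_eq_zero_of_forall_ne (stack : List (Int × Int)) (j : Int)
    (h : ∀ p ∈ stack, p.1 ≠ j) : kOf stack j = 0 := by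
  have := kOf_append_of_forall_ne stack [] j h
  simpa using this

-- B's recursive descent, found case
lemma place_found (pre : List (Int × Int)) (m col : Int) (rest : List (Int × Int))
    (letter c : Int) (hpre : ∀ p ∈ pre, letter < p.1) (hm : m ≤ letter) :
    place (pre ++ (m, col) :: rest) letter c = (pre ++ (letter, col) :: rest, col, c) := by
  induction pre with
  | nil => simp [place, hm]
  | cons p t ih =>
      obtain ⟨l, co⟩ := p
      have hl : letter < l := hpre (l, co) (by simp)
      simp only [List.cons_append, place, if_neg (by omega : ¬ l ≤ letter)]
      rw [ih (fun q hq => hpre q (by simp [hq]))]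

-- B's recursive descent, not-found case
lemma place_none (stack : List (Int × Int)) (letter c : Int)
    (h : ∀ p ∈ stack, letter < p.1) :
    place stack letter c = (stack ++ [(letter, c + 1)], c + 1, c + 1) := by
  induction stack with
  | nil => simp [place]
  | cons p t ih =>
      obtain ⟨l, co⟩ := p
      have hl : letter < l := h (l, co) (by simp)
      simp only [place, if_neg (by omega : ¬ l ≤ letter)]
      rw [ih (fun q hq => h q (by simp [hq]))]
      simp

-- A's downward scan, found case: m is the greatest index ≤ j with k[m] ≠ 0
lemma mcInner_found (k : List Int) (letter c : Int) (j m : Nat)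
    (hm : m ≤ j) (hk : k.getD m 0 ≠ 0)
    (habove : ∀ t : Nat, m < t → t ≤ j → k.getD t 0 = 0) :
    mcInner k letter c j = ((k.set letter.toNat (k.getD m 0)).set m 0, c, k.getD m 0) := by
  induction j with
  | zero =>
      have : m = 0 := by omega
      subst this
      rw [mcInner, if_pos hk]
  | succ j' ih =>
      by_cases hmj : m = j' + 1
      · subst hmj
        rw [mcInner, if_pos hk]
      · have h0 : k.getD (j' + 1) 0 = 0 := habove (j' + 1) (by omega) (le_refl _)
        rw [mcInner, if_neg (by push Not; exact h0)]
        exact ih (by omega) (fun t ht htj => habove t ht (by omega))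

-- A's downward scan, not-found case
lemma mcInner_none (k : List Int) (letter c : Int) (j : Nat)
    (h : ∀ t : Nat, t ≤ j → k.getD t 0 = 0) :
    mcInner k letter c j = (k.set letter.toNat (c + 1), c + 1, c + 1) := by
  induction j with
  | zero =>
      rw [mcInner, if_neg (by push Not; exact h 0 (le_refl _))]
  | succ j' ih =>
      rw [mcInner, if_neg (by push Not; exact h (j' + 1) (le_refl _))]
      exact ih (fun t ht => h t (by omega))

lemma getD_set_lt (xs : List Int) (i : Nat) (v : Int) (j : Nat) (hi : i < xs.length) :
    (xs.set i v).getD j 0 = if j = i then v else xs.getD j 0 := by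
  by_cases h : j = i
  · subst h; simp [List.getD_eq_getElem?_getD, hi]
  · have hne : ¬ i = j := fun hh => h hh.symm
    simp [List.getD_eq_getElem?_getD, hne]
    exact fun hh => absurd hh h

lemma dropWhile_head_false {α : Type} (p : α → Bool) (l : List α) (a : α) (t : List α)
    (h : l.dropWhile p = a :: t) : p a = false := by
  induction l with
  | nil => simp at h
  | cons x xs ih =>
      rw [List.dropWhile_cons] at h
      by_cases hp : p x
      · simp [hp] at h; exact ih h
      · simp [hp] at h; simp [← h.1]; simpa using hp

lemma kOf_append_singleton_ne (stack : List (Int × Int)) (l co j : Int) (h : l ≠ j) :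
    kOf (stack ++ [(l, co)]) j = kOf stack j := by
  induction stack with
  | nil => simp [kOf_nil, kOf_cons, h]
  | cons p t ih =>
      obtain ⟨x, y⟩ := p
      rw [List.cons_append, kOf_cons, kOf_cons, ih]

lemma kOf_middle_ne (pre rest : List (Int × Int)) (x y co j : Int) (hx : x ≠ j) (hy : y ≠ j) :
    kOf (pre ++ (x, co) :: rest) j = kOf (pre ++ (y, co) :: rest) j := by
  induction pre with
  | nil => simp [kOf_cons, hx, hy]
  | cons p t ih =>
      obtain ⟨a, b⟩ := p
      rw [List.cons_append, List.cons_append, kOf_cons, kOf_cons, ih]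

lemma inv_init : InvKS ((List.replicate 26 (0 : Int)).set 0 1) [(0, 1)] := by
  refine ⟨by simp, by simp, ?_, ?_⟩
  · intro p hp
    simp at hp
    rw [hp]
    norm_num
  · intro j hj
    rw [getD_set_lt _ 0 1 j (by simp)]
    rw [kOf_cons]
    by_cases h : j = 0
    · subst h; simp
    · rw [if_neg h, if_neg (by omega)]
      rw [kOf_nil, List.getD_eq_getElem?_getD, List.getElem?_replicate]
      split <;> rfl

-- one-letter simulation step
lemma step_sim (k : List Int) (stack : List (Int × Int)) (c letter : Int)
    (hInv : InvKS k stack) (hc : 1 ≤ c) (h0 : 0 ≤ letter) (h26 : letter < 26) :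
    (stepA k c letter).2.1 = (place stack letter c).2.2 ∧
    (stepA k c letter).2.2 = (place stack letter c).2.1 ∧
    InvKS (stepA k c letter).1 (place stack letter c).1 ∧
    1 ≤ (stepA k c letter).2.1 := by
  obtain ⟨hlen, hpw, hbnd, hpt⟩ := hInv
  have hL : ((letter.toNat : Int)) = letter := Int.toNat_of_nonneg h0
  have hL26 : letter.toNat < 26 := by omega
  set p : Int × Int → Bool := fun q => decide (letter < q.1) with hp
  have hsplit : stack = stack.takeWhile p ++ stack.dropWhile p :=
    (List.takeWhile_append_dropWhile).symm
  set pre := stack.takeWhile p with hpredef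
  set suf := stack.dropWhile p with hsufdef
  have hpre : ∀ q ∈ pre, letter < q.1 := by
    intro q hq
    have := List.mem_takeWhile_imp hq
    simpa [hp] using this
  cases hsuf : suf with
  | nil =>
      have hall : ∀ q ∈ stack, letter < q.1 := by
        intro q hq
        rw [hsplit, hsuf, List.append_nil] at hq
        exact hpre q hq
      have hzero : ∀ t : Nat, t ≤ letter.toNat → k.getD t 0 = 0 := by
        intro t ht
        rw [hpt t (by omega)]
        apply kOf_eq_zero_of_forall_ne
        intro q hq
        have := hall q hq
        omega
      have hA : stepA k c letter = (k.set letter.toNat (c + 1), c + 1, c + 1) := by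
        rw [stepA, if_neg (by push Not; exact hzero letter.toNat (le_refl _)),
          mcInner_none k letter c letter.toNat hzero]
      have hB : place stack letter c = (stack ++ [(letter, c + 1)], c + 1, c + 1) :=
        place_none stack letter c hall
      rw [hA, hB]
      refine ⟨rfl, rfl, ⟨by simpa using hlen, ?_, ?_, ?_⟩, by show (1 : Int) ≤ c + 1; omega⟩
      · rw [List.map_append, List.pairwise_append]
        refine ⟨hpw, by simp, ?_⟩
        intro a ha b hb
        simp only [List.map_cons, List.map_nil, List.mem_singleton] at hb
        subst hb
        simp only [List.mem_map] at ha
        obtain ⟨q, hq, hqa⟩ := ha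
        have := hall q hq
        omega
      · intro q hq
        rcases List.mem_append.1 hq with h1 | h1
        · exact hbnd q h1
        · simp only [List.mem_singleton] at h1
          rw [h1]
          exact ⟨h0, h26, by omega⟩
      · intro j hj
        rw [getD_set_lt k letter.toNat (c + 1) j (by omega)]
        by_cases hje : j = letter.toNat
        · subst hje
          rw [if_pos rfl,
            kOf_append_of_forall_ne _ _ _ (fun q hq => by have := hall q hq; omega),
            hL, kOf_cons, if_pos rfl]
        · rw [if_neg hje, hpt j hj,
            kOf_append_singleton_ne _ _ _ _ (by omega : letter ≠ (j : Int))]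
  | cons hd rest =>
      obtain ⟨m, col⟩ := hd
      have hdw : stack.dropWhile p = (m, col) :: rest := by rw [← hsufdef, hsuf]
      have hstack : stack = pre ++ (m, col) :: rest := by rw [hsplit, hsuf]
      have hmem : (m, col) ∈ stack := by rw [hstack]; simp
      have hm_le : m ≤ letter := by
        have := dropWhile_head_false p stack (m, col) rest hdw
        simp [hp] at this
        omega
      obtain ⟨hm0, hm26, hcol⟩ := hbnd (m, col) hmem
      have hM : ((m.toNat : Int)) = m := Int.toNat_of_nonneg hm0
      have hpw' : (pre.map Prod.fst ++ m :: rest.map Prod.fst).Pairwise (· > ·) := by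
        have hpw2 := hpw
        rw [hstack] at hpw2
        simpa using hpw2
      rw [List.pairwise_append] at hpw'
      obtain ⟨hpwpre, hpwsuf, _⟩ := hpw'
      have hrest_lt : ∀ q ∈ rest, q.1 < m := by
        intro q hq
        exact (List.pairwise_cons.1 hpwsuf).1 q.1 (List.mem_map_of_mem hq)
      have hkm : k.getD m.toNat 0 = col := by
        rw [hpt m.toNat (by omega), hM, hstack,
          kOf_append_of_forall_ne _ _ _ (fun q hq => by have := hpre q hq; omega),
          kOf_cons, if_pos rfl]
      have hzero_between : ∀ t : Nat, m.toNat < t → t ≤ letter.toNat → k.getD t 0 = 0 := by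
        intro t h1 h2
        rw [hpt t (by omega)]
        apply kOf_eq_zero_of_forall_ne
        intro q hq
        rw [hstack] at hq
        rcases List.mem_append.1 hq with hh | hh
        · have := hpre q hh; omega
        · rcases List.mem_cons.1 hh with hh2 | hh2
          · rw [hh2]; simp; omega
          · have := hrest_lt q hh2; omega
      have hB : place stack letter c = (pre ++ (letter, col) :: rest, col, c) := by
        rw [hstack]
        exact place_found pre m col rest letter c hpre hm_le
      by_cases hml : m = letter
      · have hkL : k.getD letter.toNat 0 = col := by rw [← hml]; exact hkm
        have hA : stepA k c letter = (k, c, col) := by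
          rw [stepA, if_pos (by rw [hkL]; omega), hkL]
        have hsame : pre ++ (letter, col) :: rest = stack := by rw [hstack, hml]
        rw [hA, hB, hsame]
        exact ⟨rfl, rfl, ⟨hlen, hpw, hbnd, hpt⟩, hc⟩
      · have hmlt : m < letter := lt_of_le_of_ne hm_le hml
        have hkL : k.getD letter.toNat 0 = 0 := by
          rw [hpt letter.toNat (by omega), hL]
          apply kOf_eq_zero_of_forall_ne
          intro q hq
          rw [hstack] at hq
          rcases List.mem_append.1 hq with hh | hh
          · have := hpre q hh; omega
          · rcases List.mem_cons.1 hh with hh2 | hh2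
            · rw [hh2]; simp; omega
            · have := hrest_lt q hh2; omega
        have hA : stepA k c letter = ((k.set letter.toNat col).set m.toNat 0, c, col) := by
          rw [stepA, if_neg (by push Not; exact hkL),
            mcInner_found k letter c letter.toNat m.toNat (by omega) (by rw [hkm]; omega)
              hzero_between, hkm]
        rw [hA, hB]
        refine ⟨rfl, rfl, ⟨by simpa using hlen, ?_, ?_, ?_⟩, hc⟩
        · rw [List.map_append, List.pairwise_append]
          refine ⟨hpwpre, ?_, ?_⟩
          · simp only [List.map_cons]
            rw [List.pairwise_cons]
            refine ⟨?_, (List.pairwise_cons.1 hpwsuf).2⟩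
            intro b hb
            simp only [List.mem_map] at hb
            obtain ⟨q, hq, hqb⟩ := hb
            have := hrest_lt q hq
            omega
          · intro a ha b hb
            simp only [List.mem_map] at ha
            obtain ⟨q, hq, hqa⟩ := ha
            have hqgt := hpre q hq
            simp only [List.map_cons, List.mem_cons, List.mem_map] at hb
            rcases hb with hb | hb
            · omega
            · obtain ⟨w, hw, hwb⟩ := hb
              have := hrest_lt w hw
              omega
        · intro q hq
          rcases List.mem_append.1 hq with hh | hh
          · exact hbnd q (by rw [hstack]; exact List.mem_append.2 (Or.inl hh))
          · rcases List.mem_cons.1 hh with hh2 | hh2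
            · rw [hh2]; exact ⟨h0, h26, hcol⟩
            · exact hbnd q (by rw [hstack]; simp [hh2])
        · intro j hj
          rw [getD_set_lt _ m.toNat 0 j (by simp [hlen]; omega),
            getD_set_lt k letter.toNat col j (by omega)]
          by_cases hjm : j = m.toNat
          · subst hjm
            rw [if_pos rfl]
            symm
            apply kOf_eq_zero_of_forall_ne
            intro q hq
            rcases List.mem_append.1 hq with hh | hh
            · have := hpre q hh; omega
            · rcases List.mem_cons.1 hh with hh2 | hh2
              · rw [hh2]; simp; omega
              · have := hrest_lt q hh2; omega
          · rw [if_neg hjm]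
            by_cases hjl : j = letter.toNat
            · subst hjl
              rw [if_pos rfl,
                kOf_append_of_forall_ne _ _ _ (fun q hq => by have := hpre q hq; omega),
                hL, kOf_cons, if_pos rfl]
            · rw [if_neg hjl, hpt j hj, hstack,
                kOf_middle_ne pre rest m letter col (j : Int) (by omega) (by omega)]

-- fold simulation over the character list
lemma fold_sim (ys : List Char) (hys : ∀ ch ∈ ys, 97 ≤ ch.toNat ∧ ch.toNat ≤ 122) :
    ∀ (k : List Int) (stack : List (Int × Int)) (c : Int) (ans : List Int),
    InvKS k stack → 1 ≤ c →
    (ys.foldl (fun (st : List Int × Int × List Int) (ch : Char) =>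
        let r := stepA st.1 st.2.1 ((ch.toNat : Int) - 97)
        (r.1, r.2.1, st.2.2 ++ [r.2.2])) (k, c, ans)).2 =
    (ys.foldl (fun (st : List (Int × Int) × Int × List Int) (ch : Char) =>
        let r := place st.1 ((ch.toNat : Int) - 97) st.2.1
        (r.1, r.2.2, st.2.2 ++ [r.2.1])) (stack, c, ans)).2 := by
  induction ys with
  | nil => intro k stack c ans _ _; rfl
  | cons ch ys ih =>
      intro k stack c ans hInv hc
      have hch := hys ch (by simp)
      have hb1 : (0 : Int) ≤ (ch.toNat : Int) - 97 := by omega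
      have hb2 : ((ch.toNat : Int) - 97) < 26 := by omega
      obtain ⟨h1, h2, h3, h4⟩ :=
        step_sim k stack c ((ch.toNat : Int) - 97) hInv hc hb1 hb2
      simp only [List.foldl_cons]
      rw [← h1, ← h2]
      exact ih (fun d hd => hys d (by simp [hd]))
        (stepA k c ((ch.toNat : Int) - 97)).1
        (place stack ((ch.toNat : Int) - 97) c).1
        (stepA k c ((ch.toNat : Int) - 97)).2.1
        (ans ++ [(stepA k c ((ch.toNat : Int) - 97)).2.2]) h3 h4

-- bridge: an index fold over range(n) = fold over the first n characters
lemma foldl_pyRange_take {σ : Type} (xs : List Char) (n : Int)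
    (hn : n ≤ (xs.length : Int)) (g : σ → Char → σ) (d : Char) (init : σ) :
    (PySem.List.pyRange 0 n 1).foldl (fun st i => g st (PySem.List.pyGetD xs i d)) init
      = (xs.take n.toNat).foldl g init := by
  by_cases h0 : n ≤ 0
  · rw [PySem.List.pyRange_one_eq_nil h0]
    have : n.toNat = 0 := by omega
    rw [this, List.take_zero]
    rfl
  have h0 : (0:Int) ≤ n := by omega
  have hlen : ((xs.take n.toNat).length : Int) = n := by
    simp [List.length_take]
    omega
  have hcongr : (PySem.List.pyRange 0 n 1).foldl
      (fun st i => g st (PySem.List.pyGetD xs i d)) init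
      = (PySem.List.pyRange 0 n 1).foldl
        (fun st i => g st (PySem.List.pyGetD (xs.take n.toNat) i d)) init := by
    apply PySem.List.foldl_congr_mem
    intro acc x hx
    rw [PySem.List.mem_pyRange_one] at hx
    rw [PySem.List.pyGetD_eq_getElem xs d hx.1 (by omega),
      PySem.List.pyGetD_eq_getElem (xs.take n.toNat) d hx.1 (by rw [hlen]; exact hx.2)]
    congr 1
    rw [List.getElem_take]
  have hmain := PySem.List.foldl_pyRange_zero_pyGetD' (xs.take n.toNat) d g init
  rw [hlen] at hmain
  rw [hcongr, ← hmain]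

-- ===== VERDICT (by name: the statement is the Claim_ definition above) =====
theorem minimum_colors_to_sort_string_spec : Claim_equal_minimum_colors_to_sort_string := by
  intro n s _ hPre
  obtain ⟨hnlen, hchars⟩ := hPre
  rw [PySem.Str.len_eq] at hnlen
  simp only [List.all_eq_true, Bool.and_eq_true, decide_eq_true_eq] at hchars
  unfold Spec_minimum_colors_to_sort_string
  unfold minimum_colors_to_sort_string minimum_colors_to_sort_string_alt
  rw [foldl_pyRange_take s.toList n hnlen
    (fun (st : List Int × Int × List Int) (ch : Char) =>
      let r := stepA st.1 st.2.1 ((ch.toNat : Int) - 97)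
      (r.1, r.2.1, st.2.2 ++ [r.2.2])) 'a' _,
    foldl_pyRange_take s.toList n hnlen
    (fun (st : List (Int × Int) × Int × List Int) (ch : Char) =>
      let r := place st.1 ((ch.toNat : Int) - 97) st.2.1
      (r.1, r.2.2, st.2.2 ++ [r.2.1])) 'a' _]
  exact fold_sim (s.toList.take n.toNat) hchars _ _ 1 [] inv_init (le_refl 1)
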